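-- pv_equiv track=rewrite | github.com/chalos18/COSC-Studies | COSC367/practice.py | interpretations
-- ===== SOURCE A (Python) =====
-- import itertools
--
-- def interpretations(atoms):
--     atoms = sorted(atoms)
--     interpretations = sorted(itertools.product([True, False], repeat=len(atoms)))
--
--     result = []
--     for truth in interpretations:
--         interpretation = dict(zip(atoms, truth))
--         result.append(interpretation)
--
--     return result
-- ===== SOURCE B (Python) =====
-- def interpretations(atoms):
--     atoms = sorted(atoms)
--     n = len(atoms)
--     result = []
--     for i in range(2 ** n):
--         result.append({a: bool((i >> (n - 1 - j)) & 1) for j, a in enumerate(atoms)})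
--     return result
-- ===== Notes on version B (the rewrite author's own statement) =====
-- stated objective: idiomatic
-- what changed: B replaces itertools.product([True,False], repeat=n) followed by sorting the 2^n tuples with a single loop over range(2**n) that decodes each integer index directly into a truth assignment by bit arithmetic (first atom = most significant bit), producing the same dicts in the same order without generating and sorting tuples.
import Mathlib
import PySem

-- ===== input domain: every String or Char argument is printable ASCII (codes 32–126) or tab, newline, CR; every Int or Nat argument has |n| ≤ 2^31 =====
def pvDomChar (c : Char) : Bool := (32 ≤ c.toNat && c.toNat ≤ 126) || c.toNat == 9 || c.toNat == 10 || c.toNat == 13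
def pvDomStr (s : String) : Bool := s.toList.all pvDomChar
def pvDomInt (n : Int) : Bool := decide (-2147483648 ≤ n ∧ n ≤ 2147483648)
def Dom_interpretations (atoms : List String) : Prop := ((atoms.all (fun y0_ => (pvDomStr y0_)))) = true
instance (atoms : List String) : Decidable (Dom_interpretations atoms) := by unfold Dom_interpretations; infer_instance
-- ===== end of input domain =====

-- B replaces itertools.product + sort by directly decoding each i in range(2**n) into a truth
-- assignment with bit arithmetic (objective: idiomatic/alternative; no speed claim).

-- ===== PORT A =====
-- itertools.product([True, False], repeat=n): hand port, exact (tuples in product's order,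
-- last position varies fastest).
def prodTF : Nat → List (List Bool)
  | 0 => [[]]
  | n + 1 => [true, false].flatMap (fun b => (prodTF n).map (b :: ·))

def interpretations (atoms : List String) : List (List (String × Bool)) :=
  let atoms := PySem.List.sorted atoms (fun x => x)
  let interps := PySem.List.sorted (prodTF atoms.length) (fun x => x)
  (interps.foldl (fun result truth =>
      result ++ [(atoms.zip truth).foldl
        (fun d (p : String × Bool) => d.insert p.1 p.2) PySem.Dict.empty]) []).map PySem.Dict.items

-- ===== PORT B =====
def interpretations_alt (atoms : List String) : List (List (String × Bool)) :=
  let atoms := PySem.List.sorted atoms (fun x => x)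
  let n : Int := atoms.length
  ((PySem.List.pyRange 0 ((2 : Int) ^ atoms.length)).foldl (fun result (i : Int) =>
      result ++ [(PySem.List.enumerate atoms).foldl
        (fun d ja => d.insert ja.2
          -- shift amount n-1-j: exact, since every enumerated index j satisfies 0 ≤ j ≤ n-1
          (decide (PySem.Int.band (i >>> (n - 1 - ja.1).toNat) 1 ≠ 0)))
        PySem.Dict.empty]) []).map PySem.Dict.items

-- ===== PRECONDITION & SPEC =====
def Spec_interpretations (atoms : List String) (out : List (List (String × Bool))) : Prop := out = interpretations_alt atoms
instance (atoms : List String) (out : List (List (String × Bool))) : Decidable (Spec_interpretations atoms out) := by unfold Spec_interpretations; infer_instance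

-- ===== CLAIM (what is proved, stated in full; the proofs are below) =====
def Claim_equal_interpretations : Prop := ∀ (atoms : List String), Dom_interpretations atoms → Spec_interpretations atoms (interpretations atoms)

-- ===== LEMMAS AND PROOFS =====

-- the truth assignment encoded by integer m over n atoms (first atom = most significant bit)
def decodeBits (n m : Nat) : List Bool := (List.range n).map (fun j => (m >>> (n - 1 - j)) &&& 1 == 1)

-- product([False, True], repeat=n): prodTF's tuples in increasing lexicographic order
def prodFT : Nat → List (List Bool)
  | 0 => [[]]
  | n + 1 => (prodFT n).map (false :: ·) ++ (prodFT n).map (true :: ·)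

theorem decodeBits_succ (n m : Nat) :
    decodeBits (n + 1) m = ((m >>> n) &&& 1 == 1) :: decodeBits n m := by
  unfold decodeBits
  rw [List.range_succ_eq_map, List.map_cons, List.map_map]
  congr 1
  apply List.map_congr_left
  intro a _
  simp only [Function.comp_apply]
  have h : n + 1 - 1 - a.succ = n - 1 - a := by omega
  rw [h]

theorem decodeBits_succ_lt {n m : Nat} (h : m < 2 ^ n) :
    decodeBits (n + 1) m = false :: decodeBits n m := by
  rw [decodeBits_succ]
  have : m >>> n = 0 := by
    rw [Nat.shiftRight_eq_div_pow]; exact Nat.div_eq_of_lt h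
  simp [this]

theorem shift_add_pow (n k m : Nat) (hk : k < n) :
    ((2 ^ n + m) >>> k) &&& 1 = (m >>> k) &&& 1 := by
  rw [Nat.shiftRight_eq_div_pow, Nat.shiftRight_eq_div_pow, Nat.and_one_is_mod,
    Nat.and_one_is_mod]
  rw [show 2 ^ n = 2 ^ k * 2 ^ (n - k) by rw [← pow_add]; congr 1; omega,
    Nat.mul_add_div (Nat.two_pow_pos k)]
  have h2 : 2 ^ (n - k) = 2 * 2 ^ (n - k - 1) := by rw [← pow_succ']; congr 1; omega
  omega

theorem decodeBits_succ_ge {n m : Nat} (h : m < 2 ^ n) :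
    decodeBits (n + 1) (2 ^ n + m) = true :: decodeBits n m := by
  rw [decodeBits_succ]
  have h1 : (2 ^ n + m) >>> n = 1 := by
    rw [Nat.shiftRight_eq_div_pow, Nat.add_comm, Nat.add_div_right m (Nat.two_pow_pos n),
      Nat.div_eq_of_lt h]
  rw [h1]
  simp only [Nat.reduceAnd, beq_self_eq_true, List.cons.injEq, true_and]
  unfold decodeBits
  apply List.map_congr_left
  intro j hj
  rw [List.mem_range] at hj
  rw [shift_add_pow n (n - 1 - j) m (by omega)]

theorem map_decodeBits_range (n : Nat) :
    (List.range (2 ^ n)).map (decodeBits n) = prodFT n := by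
  induction n with
  | zero => rfl
  | succ n ih =>
    rw [show 2 ^ (n + 1) = 2 ^ n + 2 ^ n by ring, List.range_add, List.map_append,
      List.map_map]
    unfold prodFT
    congr 1
    · rw [← ih, List.map_map]
      apply List.map_congr_left
      intro m hm
      rw [List.mem_range] at hm
      exact decodeBits_succ_lt hm
    · rw [← ih, List.map_map]
      apply List.map_congr_left
      intro m hm
      rw [List.mem_range] at hm
      exact decodeBits_succ_ge hm

theorem prodFT_perm (n : Nat) : (prodFT n).Perm (prodTF n) := by
  induction n with
  | zero => rfl
  | succ n ih =>
    show ((prodFT n).map (false :: ·) ++ (prodFT n).map (true :: ·)).Perm _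
    have h : prodTF (n + 1) = (prodTF n).map (true :: ·) ++ (prodTF n).map (false :: ·) := by
      simp [prodTF]
    rw [h]
    exact ((ih.map _).append (ih.map _)).trans List.perm_append_comm

theorem cons_lt_cons_of_lt {a b : List Bool} (x : Bool) (h : a < b) : x :: a < x :: b := by
  rw [List.cons_lt_cons_iff]; exact Or.inr ⟨rfl, h⟩

theorem prodFT_pairwise (n : Nat) : (prodFT n).Pairwise (· < ·) := by
  induction n with
  | zero => simp [prodFT]
  | succ n ih =>
    show ((prodFT n).map (false :: ·) ++ (prodFT n).map (true :: ·)).Pairwise (· < ·)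
    rw [List.pairwise_append]
    refine ⟨?_, ?_, ?_⟩
    · rw [List.pairwise_map]; exact ih.imp (cons_lt_cons_of_lt false)
    · rw [List.pairwise_map]; exact ih.imp (cons_lt_cons_of_lt true)
    · intro a ha b hb
      rw [List.mem_map] at ha hb
      obtain ⟨a', -, rfl⟩ := ha
      obtain ⟨b', -, rfl⟩ := hb
      rw [List.cons_lt_cons_iff]
      exact Or.inl (by decide)

theorem sorted_prodTF (n : Nat) :
    PySem.List.sorted (prodTF n) (fun x => x) = (List.range (2 ^ n)).map (decodeBits n) := by
  have h1 : ((List.range (2 ^ n)).map (decodeBits n)).Perm (prodTF n) := by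
    rw [map_decodeBits_range]; exact prodFT_perm n
  have h2 : ((List.range (2 ^ n)).map (decodeBits n)).Pairwise
      (fun a b => (fun x => x) a < (fun x => x) b) := by
    rw [map_decodeBits_range]; exact prodFT_pairwise n
  have h := PySem.List.sorted_eq_of_perm_of_pairwise_lt _ _ _ h1 h2
  convert h using 2

theorem enumfold (xs : List String) (g : Int → Bool) :
    ∀ (s : Nat) (d : PySem.Dict String Bool),
      (PySem.List.enumerate xs (s : Int)).foldl (fun d ja => d.insert ja.2 (g ja.1)) d
        = (xs.zip ((List.range xs.length).map (fun j => g ((s + j : Nat) : Int)))).foldl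
            (fun d (p : String × Bool) => d.insert p.1 p.2) d := by
  induction xs with
  | nil => intro s d; rfl
  | cons x xs ih =>
    intro s d
    have he : PySem.List.enumerate (x :: xs) (s : Int)
        = ((s : Int), x) :: PySem.List.enumerate xs ((s : Int) + 1) := by
      simp [PySem.List.enumerate]
    rw [he, List.foldl_cons]
    rw [show ((s : Int) + 1) = ((s + 1 : Nat) : Int) by push_cast; ring]
    rw [ih (s + 1)]
    rw [show (x :: xs).length = xs.length + 1 from rfl, List.range_succ_eq_map,
      List.map_cons, List.map_map, List.zip_cons_cons, List.foldl_cons]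
    simp only [Nat.add_zero]
    congr 2
    apply List.map_congr_left
    intro j _
    congr 2
    omega

theorem bit_cast (m k : Nat) :
    decide (PySem.Int.band ((m : Int) >>> k) 1 ≠ 0) = ((m >>> k) &&& 1 == 1) := by
  rw [show ((m : Int) >>> k) = ((m >>> k : Nat) : Int) by simp, PySem.Int.band_one]
  rw [show (PySem.Int.mod ((m >>> k : Nat) : Int) 2) = (((m >>> k) % 2 : Nat) : Int) by
    exact_mod_cast PySem.Int.mod_natCast (m >>> k) 2]
  rcases Nat.mod_two_eq_zero_or_one (m >>> k) with h | h <;>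
    simp [h, Nat.and_one_is_mod]

theorem row_eq (xs : List String) (m : Nat) :
    (PySem.List.enumerate xs).foldl
        (fun d ja => d.insert ja.2
          (decide (PySem.Int.band ((m : Int) >>> ((xs.length : Int) - 1 - ja.1).toNat) 1 ≠ 0)))
        PySem.Dict.empty
      = (xs.zip (decodeBits xs.length m)).foldl
          (fun d (p : String × Bool) => d.insert p.1 p.2) PySem.Dict.empty := by
  have h := enumfold xs
    (fun i => decide (PySem.Int.band ((m : Int) >>> ((xs.length : Int) - 1 - i).toNat) 1 ≠ 0))
    0 PySem.Dict.empty
  norm_num at h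
  simp only [ne_eq, decide_not]
  rw [h]
  congr 1
  unfold decodeBits
  congr 1
  apply List.map_congr_left
  intro j _
  rw [← bit_cast m (xs.length - 1 - j)]
  simp

-- ===== VERDICT (by name: the statement is the Claim_ definition above) =====
theorem interpretations_spec : Claim_equal_interpretations := by
  intro atoms _
  unfold Spec_interpretations interpretations interpretations_alt
  simp only [PySem.List.foldl_append_singleton_eq_map, List.nil_append, List.map_map]
  rw [sorted_prodTF]
  rw [show ((2 : Int) ^ (PySem.List.sorted atoms (fun x => x)).length)
      = (((2 ^ (PySem.List.sorted atoms (fun x => x)).length : Nat)) : Int) by push_cast; ring]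
  rw [PySem.List.pyRange_zero_natCast, List.map_map, List.map_map]
  apply List.map_congr_left
  intro m _
  simp only [Function.comp_apply]
  exact congrArg PySem.Dict.items (row_eq (PySem.List.sorted atoms (fun x => x)) m).symm
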